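-- pv_equiv track=rewrite | github.com/nelsonlai/freelance | python_old/Cryptography/02_classical_monoalphabetic.py | generate_key_from_passphrase
-- ===== SOURCE A (Python) =====
-- import string
--
-- def generate_key_from_passphrase(passphrase: str) -> str:
--     """
--     Generate a substitution key from a memorable passphrase.
--
--     This method creates a substitution key by:
--     1. Taking unique letters from the passphrase
--     2. Filling in remaining letters in alphabetical order
--
--     Args:
--         passphrase (str): A memorable phrase to generate the key from
--
--     Returns:
--         str: A 26-character substitution key
--
--     Example:
--         >>> generate_key_from_passphrase("PREMATURE OPTIMIZATION")
--         'PREMATUOIZNSHFLVBCDGJKQWXY'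
--     """
--     # Convert to uppercase and remove spaces
--     clean_phrase = passphrase.upper().replace(' ', '')
--
--     # Get unique letters in order of first appearance
--     unique_letters = []
--     seen = set()
--     for char in clean_phrase:
--         if char.isalpha() and char not in seen:
--             unique_letters.append(char)
--             seen.add(char)
--
--     # Add remaining letters in alphabetical order
--     for char in string.ascii_uppercase:
--         if char not in seen:
--             unique_letters.append(char)
--
--     return ''.join(unique_letters)
-- ===== SOURCE B (Python) =====
-- import string
--
-- def generate_key_from_passphrase(passphrase: str) -> str:
--     # Sort-based construction: order the 26 alphabet letters by a rank that is
--     # the position of their first occurrence in the uppercased passphrase when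
--     # present, and len + ord(c) (past every occurrence, alphabetical) when absent.
--     u = list(passphrase.upper())
--     return ''.join(sorted(string.ascii_uppercase,
--                           key=lambda c: u.index(c) if c in u else len(u) + ord(c)))
-- ===== Notes on version B (the rewrite author's own statement) =====
-- stated objective: alternative
-- what changed: Replaces A's incremental construction (seen-set dedup loop over the cleaned phrase followed by an alphabet fill loop) with a sort: the 26 alphabet letters are sorted by a rank function (first-occurrence index in the uppercased passphrase if present, else len+ord(c)), so the key falls out of one sorted() call with no dedup or seen set.
import Mathlib
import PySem

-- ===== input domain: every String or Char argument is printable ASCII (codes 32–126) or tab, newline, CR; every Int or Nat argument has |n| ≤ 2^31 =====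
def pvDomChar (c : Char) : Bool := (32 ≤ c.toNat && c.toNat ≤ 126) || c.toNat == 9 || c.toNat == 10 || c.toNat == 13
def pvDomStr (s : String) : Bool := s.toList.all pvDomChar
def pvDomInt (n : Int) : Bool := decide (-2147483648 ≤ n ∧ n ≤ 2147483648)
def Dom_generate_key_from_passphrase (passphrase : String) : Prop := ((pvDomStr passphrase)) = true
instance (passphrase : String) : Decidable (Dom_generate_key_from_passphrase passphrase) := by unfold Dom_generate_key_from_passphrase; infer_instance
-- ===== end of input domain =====

-- B replaces A's incremental build (seen-set dedup loop, then an alphabet fill loop) by ONE sort of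
-- the 26 alphabet letters under a rank (first-occurrence index in the uppercased passphrase, else
-- len+ord); an alternative algorithm of similar cost.

-- string.ascii_uppercase
def pvAsciiUppercase : List Char := "ABCDEFGHIJKLMNOPQRSTUVWXYZ".toList

-- ===== PORT A =====
def generate_key_from_passphrase (passphrase : String) : String :=
  -- clean_phrase = passphrase.upper().replace(' ', '')
  let clean_phrase : String := PySem.Str.replace (PySem.Str.upper passphrase) " " ""
  -- first loop: unique letters in order of first appearance, with a seen set
  let st : List Char × PySem.Set Char :=
    clean_phrase.toList.foldl
      (fun (st : List Char × PySem.Set Char) char =>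
        if PySem.Chars.isalpha char && !(PySem.Set.contains st.2 char) then
          (st.1 ++ [char], PySem.Set.add st.2 char)
        else st)
      ([], PySem.Set.empty)
  -- second loop: remaining letters in alphabetical order (seen is not updated here, as in A)
  let unique_letters : List Char :=
    pvAsciiUppercase.foldl
      (fun acc char => if !(PySem.Set.contains st.2 char) then acc ++ [char] else acc)
      st.1
  String.ofList unique_letters

-- ===== PORT B =====
def generate_key_from_passphrase_alt (passphrase : String) : String :=
  -- u = list(passphrase.upper())
  let u : List Char := (PySem.Str.upper passphrase).toList
  -- ''.join(sorted(string.ascii_uppercase, key=lambda c: u.index(c) if c in u else len(u) + ord(c)))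
  -- (u.index(c) is guarded by 'c in u', so it is total here; ported as List.idxOf)
  String.ofList (PySem.List.sorted pvAsciiUppercase
    (fun c => if c ∈ u then u.idxOf c else u.length + c.toNat) false)

-- ===== PRECONDITION & SPEC =====
def Spec_generate_key_from_passphrase (passphrase : String) (out : String) : Prop := out = generate_key_from_passphrase_alt passphrase
instance (passphrase : String) (out : String) : Decidable (Spec_generate_key_from_passphrase passphrase out) := by unfold Spec_generate_key_from_passphrase; infer_instance

-- ===== CLAIM (what is proved, stated in full; the proofs are below) =====
def Claim_equal_generate_key_from_passphrase : Prop := ∀ (passphrase : String), Dom_generate_key_from_passphrase passphrase → Spec_generate_key_from_passphrase passphrase (generate_key_from_passphrase passphrase)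

-- ===== LEMMAS AND PROOFS =====

-- replace s ' ' '' removes exactly the spaces
theorem pv_replace_go_space (fuel : Nat) (l acc : List Char) (h : l.length ≤ fuel) :
    PySem.Chars.replace.go [' '] [] fuel l acc = acc.reverse ++ l.filter (fun c => c != ' ') := by
  induction fuel generalizing l acc with
  | zero => cases l with
    | nil => simp [PySem.Chars.replace.go]
    | cons c t => simp at h
  | succ n ih =>
    cases l with
    | nil => simp [PySem.Chars.replace.go]
    | cons c t =>
      simp only [List.length_cons, Nat.succ_le_succ_iff] at h
      by_cases hc : c = ' '
      · subst hc
        simp [PySem.Chars.replace.go, List.isPrefixOf, ih t acc h]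
      · have hpre : List.isPrefixOf [' '] (c :: t) = false := by
          simp [List.isPrefixOf]; exact fun h' => (hc h'.symm).elim
        simp [PySem.Chars.replace.go, hpre, ih t (c :: acc) h, hc]

theorem pv_replace_space (l : List Char) :
    PySem.Chars.replace l [' '] [] = l.filter (fun c => c != ' ') := by
  simp [PySem.Chars.replace, pv_replace_go_space l.length l [] le_rfl]

-- removing spaces does not change the alpha filter
theorem pv_filter_alpha_space (l : List Char) :
    (l.filter (fun c => c != ' ')).filter PySem.Chars.isalpha = l.filter PySem.Chars.isalpha := by
  rw [List.filter_filter]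
  refine List.filter_congr (fun c _ => ?_)
  by_cases hc : c = ' '
  · subst hc; decide
  · simp [hc]

-- A's first loop computes Set.update of the alpha-filtered list, in both components
theorem pv_loop1 (l : List Char) (s : PySem.Set Char) :
    l.foldl
      (fun (st : List Char × PySem.Set Char) char =>
        if PySem.Chars.isalpha char && !(PySem.Set.contains st.2 char) then
          (st.1 ++ [char], PySem.Set.add st.2 char)
        else st)
      (s, s)
    = (PySem.Set.update s (l.filter PySem.Chars.isalpha),
       PySem.Set.update s (l.filter PySem.Chars.isalpha)) := by
  induction l generalizing s with
  | nil => simp [PySem.Set.update]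
  | cons c t ih =>
    rw [List.foldl_cons]
    by_cases ha : PySem.Chars.isalpha c
    · rw [List.filter_cons_of_pos ha,
        show ∀ (s' : PySem.Set Char) l', PySem.Set.update s' (c :: l')
          = PySem.Set.update (PySem.Set.add s' c) l' from fun _ _ => rfl]
      by_cases hs : PySem.Set.contains s c
      · have hm : c ∈ s := (PySem.Set.contains_iff s c).mp hs
        have hadd : PySem.Set.add s c = s := by simp [PySem.Set.add, hm]
        rw [if_neg (by simp [ha, hm]), hadd]
        exact ih s
      · have hm : c ∉ s := fun m => hs ((PySem.Set.contains_iff s c).mpr m)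
        have hadd : PySem.Set.add s c = s ++ [c] := by simp [PySem.Set.add, hm]
        rw [if_pos (by simp [ha, hm]), ← hadd]
        exact ih (PySem.Set.add s c)
    · rw [if_neg (by simp [ha]), List.filter_cons_of_neg (by simp [ha])]
      exact ih s

theorem pv_loop1' (l : List Char) :
    l.foldl
      (fun (st : List Char × PySem.Set Char) char =>
        if PySem.Chars.isalpha char && !(PySem.Set.contains st.2 char) then
          (st.1 ++ [char], PySem.Set.add st.2 char)
        else st)
      ([], PySem.Set.empty)
    = (PySem.Set.update PySem.Set.empty (l.filter PySem.Chars.isalpha),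
       PySem.Set.update PySem.Set.empty (l.filter PySem.Chars.isalpha)) :=
  pv_loop1 l PySem.Set.empty

-- the part Set.update s m appends: first occurrences of elements of m not already in s
def pvNews (s m : List Char) : List Char :=
  match m with
  | [] => []
  | x :: t => if PySem.Set.contains s x then pvNews s t else x :: pvNews (s ++ [x]) t

theorem pv_update_eq_news (m : List Char) : ∀ s : PySem.Set Char,
    PySem.Set.update s m = s ++ pvNews s m := by
  induction m with
  | nil => intro s; simp [PySem.Set.update, pvNews]
  | cons x t ih =>
    intro s
    rw [show PySem.Set.update s (x :: t) = PySem.Set.update (PySem.Set.add s x) t from rfl]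
    by_cases hs : PySem.Set.contains s x
    · have hm : x ∈ s := (PySem.Set.contains_iff s x).mp hs
      rw [show PySem.Set.add s x = s from by simp [PySem.Set.add, hm], ih s]
      simp [pvNews, hm]
    · have hm : x ∉ s := fun m => hs ((PySem.Set.contains_iff s x).mpr m)
      rw [show PySem.Set.add s x = s ++ [x] from by simp [PySem.Set.add, hm], ih (s ++ [x])]
      simp [pvNews, hm]

theorem pv_news_mem (m : List Char) : ∀ (s : PySem.Set Char) (a : Char),
    a ∈ pvNews s m → a ∈ m ∧ PySem.Set.contains s a = false := by
  induction m with
  | nil => intro s a h; simp [pvNews] at h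
  | cons x t ih =>
    intro s a h
    by_cases hs : PySem.Set.contains s x
    · simp only [pvNews, if_pos hs] at h
      obtain ⟨h1, h2⟩ := ih s a h
      exact ⟨List.mem_cons_of_mem _ h1, h2⟩
    · simp only [pvNews, if_neg hs] at h
      rcases List.mem_cons.mp h with h | h
      · subst h
        exact ⟨List.mem_cons_self .., by simpa using hs⟩
      · obtain ⟨h1, h2⟩ := ih (s ++ [x]) a h
        refine ⟨List.mem_cons_of_mem _ h1, ?_⟩
        have : a ∉ s ++ [x] := by
          intro hmem
          rw [(PySem.Set.contains_iff (s ++ [x]) a).mpr hmem] at h2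
          simp at h2
        have has : a ∉ s := fun hmem => this (List.mem_append_left _ hmem)
        by_contra hc
        have : PySem.Set.contains s a = true := by
          cases hcc : PySem.Set.contains s a
          · exact absurd hcc hc
          · rfl
        exact has ((PySem.Set.contains_iff s a).mp this)

theorem pv_news_pairwise (m : List Char) : ∀ s : PySem.Set Char,
    (pvNews s m).Pairwise (fun a b => m.idxOf a < m.idxOf b) := by
  induction m with
  | nil => intro s; simp [pvNews]
  | cons x t ih =>
    intro s
    by_cases hs : PySem.Set.contains s x
    · simp only [pvNews, if_pos hs]
      refine (ih s).imp_of_mem (fun {a b} ha hb hlt => ?_)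
      have hax : a ≠ x := by
        intro h; subst h
        have := (pv_news_mem t s a ha).2; rw [this] at hs; exact Bool.false_ne_true hs
      have hbx : b ≠ x := by
        intro h; subst h
        have := (pv_news_mem t s b hb).2; rw [this] at hs; exact Bool.false_ne_true hs
      rw [List.idxOf_cons_ne _ (Ne.symm hax), List.idxOf_cons_ne _ (Ne.symm hbx)]
      omega
    · simp only [pvNews, if_neg hs]
      constructor
      · intro b hb
        have hbs := (pv_news_mem t (s ++ [x]) b hb).2
        have hbx : b ≠ x := by
          intro h
          rw [h] at hbs
          simp [PySem.Set.contains] at hbs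
        rw [List.idxOf_cons_self, List.idxOf_cons_ne _ (Ne.symm hbx)]
        omega
      · refine (ih (s ++ [x])).imp_of_mem (fun {a b} ha hb hlt => ?_)
        have hax : a ≠ x := by
          intro h
          have := (pv_news_mem t (s ++ [x]) a ha).2
          rw [h] at this
          simp [PySem.Set.contains] at this
        have hbx : b ≠ x := by
          intro h
          have := (pv_news_mem t (s ++ [x]) b hb).2
          rw [h] at this
          simp [PySem.Set.contains] at this
        rw [List.idxOf_cons_ne _ (Ne.symm hax), List.idxOf_cons_ne _ (Ne.symm hbx)]
        omega

-- filtering preserves the relative order of first occurrences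
theorem pv_filter_idxOf_lt (m : List Char) (q : Char → Bool) (a b : Char)
    (ha : a ∈ m.filter q) (hb : b ∈ m.filter q)
    (h : (m.filter q).idxOf a < (m.filter q).idxOf b) : m.idxOf a < m.idxOf b := by
  induction m with
  | nil => simp at ha
  | cons x t ih =>
    by_cases hq : q x
    · rw [List.filter_cons_of_pos hq] at ha hb h
      by_cases hax : a = x
      · subst hax
        have hbx : b ≠ a := by
          intro hh; subst hh; omega
        rw [List.idxOf_cons_self, List.idxOf_cons_ne _ (Ne.symm hbx)]
        omega
      · have hbx : b ≠ x := by
          intro hh; subst hh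
          rw [List.idxOf_cons_self] at h; omega
        rw [List.idxOf_cons_ne _ (Ne.symm hax), List.idxOf_cons_ne _ (Ne.symm hbx)] at h ⊢
        have ha' : a ∈ t.filter q := by
          rcases List.mem_cons.mp ha with h' | h'
          · exact absurd h' hax
          · exact h'
        have hb' : b ∈ t.filter q := by
          rcases List.mem_cons.mp hb with h' | h'
          · exact absurd h' hbx
          · exact h'
        have := ih ha' hb' (by omega)
        omega
    · rw [List.filter_cons_of_neg hq] at ha hb h
      have hax : a ≠ x := by
        intro hh; subst hh
        exact hq (List.of_mem_filter ha)
      have hbx : b ≠ x := by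
        intro hh; subst hh
        exact hq (List.of_mem_filter hb)
      rw [List.idxOf_cons_ne _ (Ne.symm hax), List.idxOf_cons_ne _ (Ne.symm hbx)]
      have := ih ha hb h
      omega

-- character facts: an alpha character of an uppercased list is one of the 26 alphabet letters
theorem pv_isupper_of_bounds (c : Char) (h65 : 65 ≤ c.toNat) (h90 : c.toNat ≤ 90) :
    PySem.Chars.isupper c = true := by
  simp only [PySem.Chars.isupper, Bool.and_eq_true, decide_eq_true_eq, Char.le_def]
  unfold Char.toNat at h65 h90
  refine ⟨?_, ?_⟩ <;> · rw [UInt32.le_iff_toNat_le]; simp_all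

theorem pv_isupper_bounds (c : Char) (h : PySem.Chars.isupper c = true) :
    65 ≤ c.toNat ∧ c.toNat ≤ 90 := by
  simp only [PySem.Chars.isupper, Bool.and_eq_true, decide_eq_true_eq, Char.le_def] at h
  obtain ⟨h1, h2⟩ := h
  refine ⟨?_, ?_⟩ <;> · unfold Char.toNat; exact_mod_cast ‹_›

theorem pv_isupper_mem_alpha (c : Char) (h : PySem.Chars.isupper c = true) :
    c ∈ pvAsciiUppercase := by
  obtain ⟨h65, h90⟩ := pv_isupper_bounds c h
  have hofnat : Char.ofNat c.toNat = c := Char.ofNat_toNat c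
  rw [← hofnat]
  interval_cases h : c.toNat <;> decide

theorem pv_upperChar_isupper (x : Char) (h : PySem.Chars.islower x = true) :
    PySem.Chars.isupper (PySem.Chars.upperChar x) = true := by
  have hb : 97 ≤ x.toNat ∧ x.toNat ≤ 122 := by
    simp only [PySem.Chars.islower, Bool.and_eq_true, decide_eq_true_eq, Char.le_def] at h
    obtain ⟨h1, h2⟩ := h
    refine ⟨?_, ?_⟩ <;> · unfold Char.toNat; exact_mod_cast ‹_›
  have hvc : (x.toNat - 32).isValidChar := Or.inl (by omega)
  have heq : PySem.Chars.upperChar x = Char.ofNat (x.toNat - 32) := by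
    simp [PySem.Chars.upperChar, h]
  have ht : (Char.ofNat (x.toNat - 32)).toNat = x.toNat - 32 := by
    rw [Char.toNat_ofNat, if_pos hvc]
  rw [heq]
  exact pv_isupper_of_bounds _ (by omega) (by omega)

theorem pv_mem_upper_isupper (l : List Char) (c : Char)
    (hc : c ∈ PySem.Chars.upper l) (ha : PySem.Chars.isalpha c = true) :
    PySem.Chars.isupper c = true := by
  simp only [PySem.Chars.upper, List.mem_map] at hc
  obtain ⟨x, _, hx⟩ := hc
  by_cases hl : PySem.Chars.islower x = true
  · exact hx ▸ pv_upperChar_isupper x hl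
  · have hcx : c = x := by rw [← hx]; simp [PySem.Chars.upperChar, hl]
    subst hcx
    simp only [PySem.Chars.isalpha, Bool.or_eq_true] at ha
    rcases ha with h | h
    · exact h
    · exact absurd h hl

set_option maxRecDepth 8192 in
theorem pv_alpha_isalpha : ∀ b ∈ pvAsciiUppercase, PySem.Chars.isalpha b = true := by
  rw [← List.all_eq_true]
  rfl

set_option maxRecDepth 8192 in
theorem pv_alpha_pairwise : pvAsciiUppercase.Pairwise (fun a b => a.toNat < b.toNat) := by decide

set_option maxRecDepth 8192 in
theorem pv_alpha_nodup : pvAsciiUppercase.Nodup := by decide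

-- ===== VERDICT (by name: the statement is the Claim_ definition above) =====
theorem generate_key_from_passphrase_spec : Claim_equal_generate_key_from_passphrase := by
  intro passphrase _
  unfold Spec_generate_key_from_passphrase generate_key_from_passphrase generate_key_from_passphrase_alt
  simp only [PySem.Str.toList_replace, PySem.Str.toList_upper]
  have hrep : PySem.Chars.replace (PySem.Chars.upper passphrase.toList) " ".toList "".toList
      = (PySem.Chars.upper passphrase.toList).filter (fun c => c != ' ') := by
    simpa using pv_replace_space (PySem.Chars.upper passphrase.toList)
  rw [hrep, pv_loop1', pv_filter_alpha_space]
  dsimp only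
  set l : List Char := PySem.Chars.upper passphrase.toList with hldef
  set f : List Char := l.filter PySem.Chars.isalpha with hfdef
  set D : PySem.Set Char := PySem.Set.update PySem.Set.empty f with hDdef
  set key : Char → Nat := fun c => if c ∈ l then l.idxOf c else l.length + c.toNat with hkeydef
  have hfold := PySem.List.foldl_append_if
    (fun char => !(PySem.Set.contains D char)) (fun (c : Char) => c) pvAsciiUppercase D
  simp only [List.map_id_fun', id_eq] at hfold
  rw [hfold]
  set R : List Char := pvAsciiUppercase.filter (fun char => !(PySem.Set.contains D char)) with hRdef
  -- basic facts about D
  have hDeq : D = pvNews [] f := by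
    have := pv_update_eq_news f PySem.Set.empty
    simpa [PySem.Set.empty] using this
  have hDofList : D = PySem.Set.ofList f := by rw [PySem.Set.ofList_eq_foldl]; rfl
  have hDnodup : D.Nodup := hDofList ▸ PySem.Set.nodup_ofList f
  have hDf : ∀ a, a ∈ D ↔ a ∈ f := fun a => hDofList ▸ PySem.Set.mem_ofList f a
  have hDl : ∀ a ∈ D, a ∈ l := fun a ha => List.mem_of_mem_filter ((hDf a).mp ha)
  have hDalpha : ∀ a ∈ D, a ∈ pvAsciiUppercase := fun a ha =>
    pv_isupper_mem_alpha a (pv_mem_upper_isupper passphrase.toList a (hDl a ha)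
      (List.of_mem_filter ((hDf a).mp ha)))
  have hRspec : ∀ b ∈ R, b ∈ pvAsciiUppercase ∧ b ∉ l := by
    intro b hb
    have hmem := List.mem_of_mem_filter hb
    have hflt := List.of_mem_filter hb
    have hnD : b ∉ D := by
      intro hbD
      rw [(PySem.Set.contains_iff D b).mpr hbD] at hflt
      simp at hflt
    exact ⟨hmem, fun hbl =>
      hnD ((hDf b).mpr (List.mem_filter.mpr ⟨hbl, pv_alpha_isalpha b hmem⟩))⟩
  have hkeyD : ∀ a ∈ D, key a = l.idxOf a := fun a ha => if_pos (hDl a ha)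
  have hkeyR : ∀ b ∈ R, key b = l.length + b.toNat := fun b hb => if_neg (hRspec b hb).2
  -- (D ++ R) is strictly increasing under the rank
  have hpairD : D.Pairwise (fun a b => key a < key b) := by
    rw [hDeq]
    refine (pv_news_pairwise f []).imp_of_mem (fun {a b} ha hb hlt => ?_)
    have haD : a ∈ D := by rw [hDeq]; exact ha
    have hbD : b ∈ D := by rw [hDeq]; exact hb
    have hidx := pv_filter_idxOf_lt l PySem.Chars.isalpha a b
      ((hDf a).mp haD) ((hDf b).mp hbD) hlt
    rw [hkeyD a haD, hkeyD b hbD]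
    exact hidx
  have hpairR : R.Pairwise (fun a b => key a < key b) := by
    refine (List.Pairwise.sublist List.filter_sublist pv_alpha_pairwise).imp_of_mem
      (fun {a b} ha hb hlt => ?_)
    rw [hkeyR a ha, hkeyR b hb]
    omega
  have hcross : ∀ a ∈ D, ∀ b ∈ R, key a < key b := by
    intro a ha b hb
    rw [hkeyD a ha, hkeyR b hb]
    have := List.idxOf_lt_length_iff.mpr (hDl a ha)
    omega
  have hpair : (D ++ R).Pairwise (fun a b => key a < key b) := by
    rw [List.pairwise_append]
    exact ⟨hpairD, hpairR, hcross⟩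
  -- (D ++ R) is a permutation of the alphabet
  have hpD : D.Perm (pvAsciiUppercase.filter (fun c => PySem.Set.contains D c)) := by
    refine List.perm_of_nodup_nodup_toFinset_eq hDnodup
      ((List.filter_sublist).nodup pv_alpha_nodup) ?_
    ext c
    simp only [List.mem_toFinset, List.mem_filter]
    constructor
    · intro hc
      exact ⟨hDalpha c hc, (PySem.Set.contains_iff D c).mpr hc⟩
    · rintro ⟨-, hc⟩
      exact (PySem.Set.contains_iff D c).mp hc
  have hperm : (D ++ R).Perm pvAsciiUppercase :=
    (hpD.append (List.Perm.refl R)).trans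
      (List.filter_append_perm (fun c => PySem.Set.contains D c) pvAsciiUppercase)
  exact congrArg String.ofList
    (PySem.List.sorted_eq_of_perm_of_pairwise_lt pvAsciiUppercase (D ++ R) key hperm hpair).symm
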